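-- pv_equiv track=rewrite | github.com/M4skEl/ComputersNetworks | Network3/network3.py | shannon_fano_decode
-- ===== SOURCE A (Python) =====
-- from typing import Dict, List, Tuple
--
-- def shannon_fano_decode(encoded_text: str, code_map: Dict[str, str]) -> str:
--     # Инвертируем список кодов для букв
--     inv_code_map = {v: k for k, v in code_map.items()}
--     decoded_text = ''
--     current_code = ''
--     # Декодируем
--     for bit in encoded_text:
--         current_code += bit
--         if current_code in inv_code_map:
--             decoded_text += inv_code_map[current_code]
--             current_code = ''
--     return decoded_text
-- ===== SOURCE B (Python) =====
-- def shannon_fano_decode(encoded_text, code_map):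
--     # Invert the code map (last entry wins on duplicate codes, like the dict comprehension in A)
--     inv = {v: k for k, v in code_map.items()}
--     # Distinct lengths of (non-empty) codes, shortest first: only these prefix lengths can ever match
--     lens = sorted({len(c) for c in inv if c})
--     out = []
--     i, n = 0, len(encoded_text)
--     while i < n:
--         matched = False
--         for L in lens:
--             if i + L <= n and encoded_text[i:i+L] in inv:
--                 out.append(inv[encoded_text[i:i+L]])
--                 i += L
--                 matched = True
--                 break
--         if not matched:
--             break  # no code can start here, so A would never match again either
--     return ''.join(out)
-- ===== Notes on version B (the rewrite author's own statement) =====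
-- stated objective: alternative
-- what changed: B precomputes the sorted set of distinct non-empty code lengths and decodes by direct sliced lookups at each position (shortest candidate length first, stopping at the first position where no length can match), replacing A's character-by-character accumulation of a growing current_code string tested against the inverted map on every bit.
import Mathlib
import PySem

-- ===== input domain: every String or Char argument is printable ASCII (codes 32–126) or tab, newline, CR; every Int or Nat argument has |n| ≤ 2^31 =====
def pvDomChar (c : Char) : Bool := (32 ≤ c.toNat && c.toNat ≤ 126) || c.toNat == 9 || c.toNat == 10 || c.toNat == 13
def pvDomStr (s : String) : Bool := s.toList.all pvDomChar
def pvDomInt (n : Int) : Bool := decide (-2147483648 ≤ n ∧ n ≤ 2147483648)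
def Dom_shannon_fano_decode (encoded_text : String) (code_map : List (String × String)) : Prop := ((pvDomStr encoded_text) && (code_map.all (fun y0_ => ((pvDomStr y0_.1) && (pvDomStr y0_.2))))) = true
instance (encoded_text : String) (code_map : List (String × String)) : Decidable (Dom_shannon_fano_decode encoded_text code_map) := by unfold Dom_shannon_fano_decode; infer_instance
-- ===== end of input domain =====

-- B decodes by trying only the distinct code lengths (shortest first) at each position with a
-- sliced-lookup, instead of A's char-by-char accumulation; alternative decomposition, same results.

-- shared helper: both Pythons contain the identical line `inv = {v: k for k, v in code_map.items()}`
def invertCodes (code_map : List (String × String)) : PySem.Dict (List Char) (List Char) :=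
  code_map.foldl (fun d kv => d.insert kv.2.toList kv.1.toList) PySem.Dict.empty

-- ===== PORT A =====
def shannon_fano_decode (encoded_text : String) (code_map : List (String × String)) : String :=
  String.ofList (encoded_text.toList.foldl (fun st bit =>
    match (invertCodes code_map).get? (st.2 ++ [bit]) with
    | some s => (st.1 ++ s, ([] : List Char))
    | none => (st.1, st.2 ++ [bit])) (([] : List Char), ([] : List Char))).1

-- ===== PORT B =====
-- `sorted({len(c) for c in inv if c})`
def codeLens (inv : PySem.Dict (List Char) (List Char)) : List Nat :=
  PySem.List.sorted (PySem.Set.ofList ((inv.keys.filter (fun c => !c.isEmpty)).map List.length))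
    (fun x => x) false

-- the inner `for L in lens:` loop of B: first length L (in order) with i+L<=n and a dict hit
def firstMatch (inv : PySem.Dict (List Char) (List Char)) (lens : List Nat)
    (rest : List Char) : Option (Nat × List Char) :=
  match lens with
  | [] => none
  | L :: ls =>
    -- the `0 < L` conjunct is a termination guard only: codeLens never contains 0
    if 0 < L ∧ L ≤ rest.length then
      match inv.get? (rest.take L) with
      | some s => some (L, s)
      | none => firstMatch inv ls rest
    else firstMatch inv ls rest

theorem firstMatch_bounds (inv : PySem.Dict (List Char) (List Char)) (lens : List Nat)
    (rest : List Char) (L : Nat) (s : List Char)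
    (h : firstMatch inv lens rest = some (L, s)) : 0 < L ∧ L ≤ rest.length := by
  induction lens with
  | nil => simp [firstMatch] at h
  | cons a ls ih =>
    simp only [firstMatch] at h
    split at h
    · rename_i hg
      split at h
      · cases h
        exact hg
      · exact ih h
    · exact ih h

-- B's outer `while i < n` loop
def goB (inv : PySem.Dict (List Char) (List Char)) (lens : List Nat)
    (rest : List Char) : List Char :=
  match h : firstMatch inv lens rest with
  | none => []
  | some (L, s) => s ++ goB inv lens (rest.drop L)
termination_by rest.length
decreasing_by
  have := firstMatch_bounds inv lens rest L s h
  simp only [List.length_drop]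
  omega

def shannon_fano_decode_alt (encoded_text : String) (code_map : List (String × String)) : String :=
  String.ofList (goB (invertCodes code_map) (codeLens (invertCodes code_map)) encoded_text.toList)

-- ===== PRECONDITION & SPEC =====
def Spec_shannon_fano_decode (encoded_text : String) (code_map : List (String × String)) (out : String) : Prop := out = shannon_fano_decode_alt encoded_text code_map
instance (encoded_text : String) (code_map : List (String × String)) (out : String) : Decidable (Spec_shannon_fano_decode encoded_text code_map out) := by unfold Spec_shannon_fano_decode; infer_instance

-- ===== CLAIM (what is proved, stated in full; the proofs are below) =====
def Claim_equal_shannon_fano_decode : Prop := ∀ (encoded_text : String) (code_map : List (String × String)), Dom_shannon_fano_decode encoded_text code_map → Spec_shannon_fano_decode encoded_text code_map (shannon_fano_decode encoded_text code_map)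

-- ===== LEMMAS AND PROOFS =====

theorem goB_of_none (inv : PySem.Dict (List Char) (List Char)) (lens : List Nat)
    (rest : List Char) (h : firstMatch inv lens rest = none) : goB inv lens rest = [] := by
  rw [goB]; split
  · rfl
  · rename_i h' ; rw [h] at h'; cases h'

theorem goB_of_some (inv : PySem.Dict (List Char) (List Char)) (lens : List Nat)
    (rest : List Char) (L : Nat) (s : List Char) (h : firstMatch inv lens rest = some (L, s)) :
    goB inv lens rest = s ++ goB inv lens (rest.drop L) := by
  rw [goB]; split
  · rename_i h'; rw [h] at h'; cases h'
  · rename_i L' s' h'; rw [h] at h'; cases h'; rfl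

theorem firstMatch_eq_none (inv : PySem.Dict (List Char) (List Char)) (lens : List Nat)
    (rest : List Char)
    (h : ∀ L ∈ lens, 0 < L → L ≤ rest.length → inv.get? (rest.take L) = none) :
    firstMatch inv lens rest = none := by
  induction lens with
  | nil => rfl
  | cons a ls ih =>
    simp only [firstMatch]
    split
    · rename_i hg
      rw [h a (by simp) hg.1 hg.2]
      exact ih (fun L hL => h L (by simp [hL]))
    · exact ih (fun L hL => h L (by simp [hL]))

theorem firstMatch_eq_some (inv : PySem.Dict (List Char) (List Char)) (lens : List Nat)
    (rest : List Char) (L0 : Nat) (s : List Char)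
    (hpw : lens.Pairwise (· < ·)) (hmem : L0 ∈ lens) (hpos : 0 < L0) (hle : L0 ≤ rest.length)
    (hbefore : ∀ L ∈ lens, L < L0 → inv.get? (rest.take L) = none)
    (hhit : inv.get? (rest.take L0) = some s) :
    firstMatch inv lens rest = some (L0, s) := by
  induction lens with
  | nil => cases hmem
  | cons a ls ih =>
    have hpw' := (List.pairwise_cons.mp hpw).2
    have hfst := (List.pairwise_cons.mp hpw).1
    rcases Nat.lt_trichotomy a L0 with hlt | heq | hgt
    · -- a < L0 : this length fails (or is skipped), recurse
      have hmem' : L0 ∈ ls := by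
        cases hmem with
        | head => omega
        | tail _ h => exact h
      simp only [firstMatch]
      split
      · rw [hbefore a (by simp) hlt]
        exact ih hpw' hmem' (fun L hL hLlt => hbefore L (by simp [hL]) hLlt)
      · exact ih hpw' hmem' (fun L hL hLlt => hbefore L (by simp [hL]) hLlt)
    · subst heq
      simp only [firstMatch]
      rw [if_pos ⟨hpos, hle⟩, hhit]
    · -- a > L0 : impossible, L0 is in the list but everything from a on is > L0
      exfalso
      cases hmem with
      | head => omega
      | tail _ h => exact absurd (hfst _ h) (by omega)

-- every positive length of a key of inv is in codeLens inv
theorem mem_codeLens (inv : PySem.Dict (List Char) (List Char)) (k s : List Char)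
    (hget : inv.get? k = some s) (hne : k ≠ []) : k.length ∈ codeLens inv := by
  have hkeys : k ∈ inv.keys := by
    rw [← PySem.Dict.contains_iff_mem_keys]
    rw [PySem.Dict.contains_eq_isSome_get?, hget]
    rfl
  unfold codeLens
  rw [PySem.List.mem_sorted, PySem.Set.mem_ofList]
  exact List.mem_map.mpr ⟨k, List.mem_filter.mpr ⟨hkeys, by simpa using hne⟩, rfl⟩

theorem codeLens_pos (inv : PySem.Dict (List Char) (List Char)) :
    ∀ L ∈ codeLens inv, 0 < L := by
  intro L hL
  unfold codeLens at hL
  rw [PySem.List.mem_sorted, PySem.Set.mem_ofList] at hL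
  obtain ⟨c, hc, rfl⟩ := List.mem_map.mp hL
  have := (List.mem_filter.mp hc).2
  simp only [Bool.not_eq_eq_eq_not, Bool.not_true, List.isEmpty_eq_false_iff] at this
  exact List.length_pos_of_ne_nil this

theorem codeLens_pairwise (inv : PySem.Dict (List Char) (List Char)) :
    (codeLens inv).Pairwise (· < ·) :=
  PySem.List.sorted_ofList_pairwise_lt _

-- A's loop, started with an unmatched buffer `pre`, computes dec ++ B's decode of pre ++ cs.
theorem loop_eq (inv : PySem.Dict (List Char) (List Char)) (lens : List Nat)
    (hpos : ∀ L ∈ lens, 0 < L) (hpw : lens.Pairwise (· < ·))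
    (hkey : ∀ k s, inv.get? k = some s → k ≠ [] → k.length ∈ lens) :
    ∀ (cs pre dec : List Char),
    (∀ j, 1 ≤ j → j ≤ pre.length → inv.get? (pre.take j) = none) →
    (cs.foldl (fun st bit =>
      let cur := st.2 ++ [bit]
      match inv.get? cur with
      | some s => (st.1 ++ s, ([] : List Char))
      | none => (st.1, cur)) (dec, pre)).1
    = dec ++ goB inv lens (pre ++ cs) := by
  intro cs
  induction cs with
  | nil =>
    intro pre dec hinv
    have hnone : firstMatch inv lens pre = none :=
      firstMatch_eq_none inv lens pre (fun L hL hLpos hLle => hinv L hLpos hLle)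
    simp [goB_of_none inv lens pre hnone]
  | cons b cs' ih =>
    intro pre dec hinv
    simp only [List.foldl_cons]
    cases hmatch : inv.get? (pre ++ [b]) with
    | none =>
      have hinv' : ∀ j, 1 ≤ j → j ≤ (pre ++ [b]).length → inv.get? ((pre ++ [b]).take j) = none := by
        intro j h1 h2
        simp only [List.length_append, List.length_cons, List.length_nil] at h2
        rcases Nat.lt_or_ge j (pre.length + 1) with hj | hj
        · rw [List.take_append_of_le_length (by omega)]
          exact hinv j h1 (by omega)
        · have : j = pre.length + 1 := by omega
          subst this
          rw [List.take_of_length_le (by simp)]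
          exact hmatch
      have := ih (pre ++ [b]) dec hinv'
      simp only [hmatch] at *
      rw [this]
      simp
    | some s =>
      have hmem : (pre.length + 1) ∈ lens := by
        have := hkey (pre ++ [b]) s hmatch (by simp)
        simpa using this
      have htake : (pre ++ b :: cs').take (pre.length + 1) = pre ++ [b] := by
        rw [List.take_append]
        simp
      have hfm : firstMatch inv lens (pre ++ b :: cs') = some (pre.length + 1, s) := by
        apply firstMatch_eq_some inv lens _ _ _ hpw hmem (by omega) (by simp)
        · intro L hL hLlt
          rw [List.take_append_of_le_length (by omega)]
          exact hinv L (hpos L hL) (by omega)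
        · rw [htake]; exact hmatch
      have hdrop : (pre ++ b :: cs').drop (pre.length + 1) = cs' := by
        rw [List.drop_append]
        simp
      have := ih ([] : List Char) (dec ++ s) (by intro j h1 h2; simp at h2; omega)
      simp only [hmatch] at *
      rw [this]
      rw [goB_of_some inv lens _ _ _ hfm, hdrop]
      simp

-- ===== VERDICT (by name: the statement is the Claim_ definition above) =====
theorem shannon_fano_decode_spec : Claim_equal_shannon_fano_decode := by
  intro encoded_text code_map _
  unfold Spec_shannon_fano_decode shannon_fano_decode shannon_fano_decode_alt
  have := loop_eq (invertCodes code_map) (codeLens (invertCodes code_map))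
    (codeLens_pos _) (codeLens_pairwise _) (fun k s h hne => mem_codeLens _ k s h hne)
    encoded_text.toList [] []
    (by intro j h1 h2; simp at h2; omega)
  simp only [List.nil_append] at this
  rw [this]
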